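-- pv_equiv track=rewrite | github.com/Taffr/AppliedML | NaiveClassifiers/NaiveBayesianClassifier.py | __frequencyTables
-- ===== SOURCE A (Python) =====
-- def __frequencyTables(dataset, featureValues, targetValues):
--     freqTables = dict()
--     # make a freq. table for each pixel
--     for featureItem in featureValues.items():
--         freqTables[featureItem[0]] = dict()
--         for value in featureItem[1]:
--             freqTables[featureItem[0]][value] = dict()
--             for target in targetValues:
--                 freqTables[featureItem[0]][value][target] = 0
--
--     # loop through the dataset
--     for row in range(len(dataset)):
--         for col in range(len(dataset[row][0])):
--             freqTables[col][dataset[row][0][col]][dataset[row][1]] += 1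
--
--     return freqTables
-- ===== SOURCE B (Python) =====
-- def __frequencyTables(dataset, featureValues, targetValues):
--     freqTables = {col: {value: {target: 0 for target in targetValues}
--                         for value in values}
--                   for col, values in featureValues.items()}
--     events = sorted(((c, v, label) for features, label in dataset
--                      for c, v in enumerate(features)),
--                     key=lambda e: (e[0], e[1]))
--     i = 0
--     while i < len(events):
--         j = i
--         while j < len(events) and events[j] == events[i]:
--             j += 1
--         c, v, t = events[i]
--         freqTables[c][v][t] += j - i
--         i = j
--     return freqTables
-- ===== Notes on version B (the rewrite author's own statement) =====
-- stated objective: alternative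
-- what changed: A does an event-driven pass incrementing each table cell by 1 per dataset cell; B instead flattens the dataset to a (col, value, label) event list, SORTS it (stably, by (col, value)), and a two-pointer run-length scan merges each run of equal events into the zero-initialised table in one += per run, still raising KeyError exactly when an event references an undeclared slot.
import Mathlib
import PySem

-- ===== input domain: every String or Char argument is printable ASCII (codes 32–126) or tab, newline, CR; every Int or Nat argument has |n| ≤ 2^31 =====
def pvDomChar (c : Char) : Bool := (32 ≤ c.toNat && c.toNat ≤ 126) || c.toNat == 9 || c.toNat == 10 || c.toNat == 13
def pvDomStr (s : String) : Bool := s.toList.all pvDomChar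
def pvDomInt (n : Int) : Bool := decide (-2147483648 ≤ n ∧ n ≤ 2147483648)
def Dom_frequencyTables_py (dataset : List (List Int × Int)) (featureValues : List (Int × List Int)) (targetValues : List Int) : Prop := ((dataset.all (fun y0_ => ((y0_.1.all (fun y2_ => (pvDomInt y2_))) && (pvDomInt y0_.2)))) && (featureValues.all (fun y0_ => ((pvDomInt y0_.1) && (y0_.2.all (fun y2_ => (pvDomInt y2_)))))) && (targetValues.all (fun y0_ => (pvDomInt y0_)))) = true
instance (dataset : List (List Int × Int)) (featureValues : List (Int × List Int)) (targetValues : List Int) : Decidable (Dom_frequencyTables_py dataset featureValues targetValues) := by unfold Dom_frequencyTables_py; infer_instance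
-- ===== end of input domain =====

-- B replaces A's per-event '+= 1' pass by sort-then-scan: flatten the dataset to events, sort them,
-- and merge each run of equal events into the zero table with one '+= runlength' (alternative).


-- ===== PORT A =====
-- literal transliteration: zero-initialise the nested table over featureValues/targetValues, then
-- 'for row in range(len(dataset)): for col in range(len(dataset[row][0])): table[col][v][t] += 1'.
-- The '+=' (KeyError on a missing key in Python, excluded by Pre_) is written in its total getD/insert form.
def frequencyTables_py (dataset : List (List Int × Int)) (featureValues : List (Int × List Int)) (targetValues : List Int) : List (Int × List (Int × List (Int × Int))) :=
  let init : PySem.Dict Int (PySem.Dict Int (PySem.Dict Int Int)) :=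
    featureValues.foldl (fun ft fi =>
      ft.insert fi.1 (fi.2.foldl (fun dv v =>
        dv.insert v (targetValues.foldl (fun dt t => dt.insert t 0) PySem.Dict.empty))
        PySem.Dict.empty)) PySem.Dict.empty
  let final : PySem.Dict Int (PySem.Dict Int (PySem.Dict Int Int)) :=
    (PySem.List.pyRange 0 (dataset.length : Int)).foldl (fun ft row =>
      (fun (r : List Int × Int) =>
        (PySem.List.pyRange 0 (r.1.length : Int)).foldl (fun ft col =>
          let dv := ft.getD col PySem.Dict.empty
          let dt := dv.getD (PySem.List.pyGetD r.1 col 0) PySem.Dict.empty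
          ft.insert col (dv.insert (PySem.List.pyGetD r.1 col 0)
            (dt.insert r.2 (dt.getD r.2 0 + 1)))) ft)
        (PySem.List.pyGetD dataset row ([], 0))) init
  final.items.map (fun p => (p.1, p.2.items.map (fun q => (q.1, q.2.items))))

-- ===== PORT B =====
-- transliteration of Source B's two while loops: the outer loop walks run by run (the inner
-- 'while events[j] == events[i]: j += 1' is the leading run of equal events, j - i its length),
-- doing one '+= (j - i)' per run; written as the obvious structural recursion on the event list.
def mergeRuns : List (Int × Int × Int) → PySem.Dict Int (PySem.Dict Int (PySem.Dict Int Int)) → PySem.Dict Int (PySem.Dict Int (PySem.Dict Int Int))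
  | [], ft => ft
  | e :: rest, ft =>
      let n : Int := 1 + ((rest.takeWhile (fun x => x == e)).length : Int)
      let dv := ft.getD e.1 PySem.Dict.empty
      let dt := dv.getD e.2.1 PySem.Dict.empty
      mergeRuns (rest.dropWhile (fun x => x == e))
        (ft.insert e.1 (dv.insert e.2.1 (dt.insert e.2.2 (dt.getD e.2.2 0 + n))))
  termination_by l _ => l.length
  decreasing_by
    have := List.length_dropWhile_le (fun x => x == e) rest
    simp only [List.length_cons]
    omega

def frequencyTables_py_alt (dataset : List (List Int × Int)) (featureValues : List (Int × List Int)) (targetValues : List Int) : List (Int × List (Int × List (Int × Int))) :=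
  let freqTables : PySem.Dict Int (PySem.Dict Int (PySem.Dict Int Int)) :=
    featureValues.foldl (fun d fi =>
      d.insert fi.1 (fi.2.foldl (fun dv v =>
        dv.insert v (targetValues.foldl (fun dt t => dt.insert t 0) PySem.Dict.empty))
        PySem.Dict.empty)) PySem.Dict.empty
  let events : List (Int × Int × Int) :=
    PySem.List.sorted2
      (dataset.flatMap (fun r => (PySem.List.enumerate r.1).map (fun p => (p.1, p.2, r.2))))
      (fun e => e.1) (fun e => e.2.1)
  (mergeRuns events freqTables).items.map (fun p => (p.1, p.2.items.map (fun q => (q.1, q.2.items))))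

-- ===== PRECONDITION & SPEC =====
-- Pre_ excludes (a) datasets that reference a feature column, feature value or target absent from the
-- declared tables — on those Python A raises KeyError; and (b) featureValues lists with duplicate keys,
-- which represent no Python dict (featureValues is a dict, so its keys are distinct by construction:
-- clause (b) excludes no input the Python function can be called on).
def Pre_frequencyTables_py (dataset : List (List Int × Int)) (featureValues : List (Int × List Int)) (targetValues : List Int) : Prop :=
  (featureValues.map (·.1)).Nodup ∧
  ∀ r ∈ dataset, ∀ p ∈ PySem.List.enumerate r.1,
    ∃ q ∈ featureValues, q.1 = p.1 ∧ p.2 ∈ q.2 ∧ r.2 ∈ targetValues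
instance (dataset : List (List Int × Int)) (featureValues : List (Int × List Int)) (targetValues : List Int) : Decidable (Pre_frequencyTables_py dataset featureValues targetValues) := by unfold Pre_frequencyTables_py; infer_instance
def pvWitness_frequencyTables_py : (List (List Int × Int)) × (List (Int × List Int)) × List Int :=
  ([([0, 1], 1), ([0, 0], 2)], [(0, [0, 1]), (1, [0, 1])], [1, 2])
def Spec_frequencyTables_py (dataset : List (List Int × Int)) (featureValues : List (Int × List Int)) (targetValues : List Int) (out : List (Int × List (Int × List (Int × Int)))) : Prop := out = frequencyTables_py_alt dataset featureValues targetValues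
instance (dataset : List (List Int × Int)) (featureValues : List (Int × List Int)) (targetValues : List Int) (out : List (Int × List (Int × List (Int × Int)))) : Decidable (Spec_frequencyTables_py dataset featureValues targetValues out) := by unfold Spec_frequencyTables_py; infer_instance

-- ===== CLAIM (what is proved, stated in full; the proofs are below) =====
def Claim_equal_frequencyTables_py : Prop := ∀ (dataset : List (List Int × Int)) (featureValues : List (Int × List Int)) (targetValues : List Int), Dom_frequencyTables_py dataset featureValues targetValues → Pre_frequencyTables_py dataset featureValues targetValues → Spec_frequencyTables_py dataset featureValues targetValues (frequencyTables_py dataset featureValues targetValues)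

-- ===== LEMMAS AND PROOFS =====

-- the innermost table {t: g t for t in tvs}
def lowD (tvs : List Int) (k : Int → Int) : PySem.Dict Int Int :=
  tvs.foldl (fun dt t => dt.insert t (k t)) PySem.Dict.empty
-- the middle table {v: low … for v in vals}
def midD (vals : List Int) (tvs : List Int) (h : Int → Int → Int) : PySem.Dict Int (PySem.Dict Int Int) :=
  vals.foldl (fun dv v => dv.insert v (lowD tvs (h v))) PySem.Dict.empty
-- the whole table with cell function g
def bldD (fvs : List (Int × List Int)) (tvs : List Int) (g : Int → Int → Int → Int) : PySem.Dict Int (PySem.Dict Int (PySem.Dict Int Int)) :=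
  fvs.foldl (fun d fi => d.insert fi.1 (midD fi.2 tvs (g fi.1))) PySem.Dict.empty

-- one '+= 1' step of A's dataset loop
def bump (c v t : Int) (ft : PySem.Dict Int (PySem.Dict Int (PySem.Dict Int Int))) : PySem.Dict Int (PySem.Dict Int (PySem.Dict Int Int)) :=
  let dv := ft.getD c PySem.Dict.empty
  let dt := dv.getD v PySem.Dict.empty
  ft.insert c (dv.insert v (dt.insert t (dt.getD t 0 + 1)))

-- one '+= n' merge step of B's run loop
def bumpN (c v t n : Int) (ft : PySem.Dict Int (PySem.Dict Int (PySem.Dict Int Int))) : PySem.Dict Int (PySem.Dict Int (PySem.Dict Int Int)) :=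
  let dv := ft.getD c PySem.Dict.empty
  let dt := dv.getD v PySem.Dict.empty
  ft.insert c (dv.insert v (dt.insert t (dt.getD t 0 + n)))

-- the dataset flattened to its (col, value, target) events
def evs (dataset : List (List Int × Int)) : List (Int × Int × Int) :=
  dataset.flatMap (fun r => (PySem.List.enumerate r.1).map (fun p => (p.1, p.2, r.2)))

def Decl (fvs : List (Int × List Int)) (tvs : List Int) (e : Int × Int × Int) : Prop :=
  ∃ q ∈ fvs, q.1 = e.1 ∧ e.2.1 ∈ q.2 ∧ e.2.2 ∈ tvs

theorem bldD_congr (fvs : List (Int × List Int)) (tvs : List Int) (g g' : Int → Int → Int → Int)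
    (h : ∀ f v t, g f v t = g' f v t) : bldD fvs tvs g = bldD fvs tvs g' := by
  have : g = g' := by funext a b c; exact h a b c
  rw [this]

theorem get?_foldl_insertF_of_not_mem {κ β : Type} [BEq κ] [LawfulBEq κ] (F : κ → β) :
    ∀ (l : List κ) (d : PySem.Dict κ β) (v : κ), v ∉ l →
      (l.foldl (fun d x => d.insert x (F x)) d).get? v = d.get? v := by
  intro l
  induction l with
  | nil => intro d v _; rfl
  | cons x xs ih =>
    intro d v hv
    simp only [List.mem_cons, not_or] at hv
    simp only [List.foldl_cons]
    rw [ih _ _ hv.2, PySem.Dict.get?_insert_of_ne _ _ hv.1]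

theorem get?_foldl_insertF_of_mem {κ β : Type} [BEq κ] [LawfulBEq κ] (F : κ → β) :
    ∀ (l : List κ) (d : PySem.Dict κ β) (v : κ), v ∈ l →
      (l.foldl (fun d x => d.insert x (F x)) d).get? v = some (F v) := by
  intro l
  induction l with
  | nil => intro d v hv; simp at hv
  | cons x xs ih =>
    intro d v hv
    simp only [List.foldl_cons]
    by_cases h : v ∈ xs
    · exact ih _ _ h
    · have hx : v = x := by rcases List.mem_cons.mp hv with h' | h' <;> [exact h'; exact absurd h' h]
      subst hx
      rw [get?_foldl_insertF_of_not_mem F xs _ _ h, PySem.Dict.get?_insert_self]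

theorem insert_insert_comm_of_contains {κ β : Type} [BEq κ] [LawfulBEq κ]
    (d : PySem.Dict κ β) {x v : κ} (w u : β) (hne : x ≠ v) (hc : d.contains v = true) :
    (d.insert v w).insert x u = (d.insert x u).insert v w := by
  apply PySem.Dict.ext
  by_cases hx : d.contains x = true
  · have h1 : (d.insert v w).contains x = true := by
      rw [PySem.Dict.contains_insert]; simp [hx]
    have h2 : (d.insert x u).contains v = true := by
      rw [PySem.Dict.contains_insert]; simp [hc]
    rw [PySem.Dict.items_insert_of_contains _ _ h1, PySem.Dict.items_insert_of_contains _ _ hc,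
        PySem.Dict.items_insert_of_contains _ _ h2, PySem.Dict.items_insert_of_contains _ _ hx]
    simp only [List.map_map]
    apply List.map_congr_left
    intro p _
    simp only [Function.comp_apply, beq_iff_eq]
    by_cases hpv : p.1 = v
    · simp [hpv, Ne.symm hne]
    · by_cases hpx : p.1 = x <;> simp [hpv, hpx, hne]
  · have hx' : d.contains x = false := by simpa using hx
    have h1 : (d.insert v w).contains x = false := by
      rw [PySem.Dict.contains_insert]; simp [hx', hne]
    have h2 : (d.insert x u).contains v = true := by
      rw [PySem.Dict.contains_insert]; simp [hc]
    rw [PySem.Dict.items_insert_of_not_contains _ _ h1, PySem.Dict.items_insert_of_contains _ _ hc,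
        PySem.Dict.items_insert_of_contains _ _ h2, PySem.Dict.items_insert_of_not_contains _ _ hx']
    simp only [List.map_append, List.map_cons, List.map_nil, beq_iff_eq]
    rw [if_neg (by simpa using hne)]

theorem foldl_insert_rel {κ β : Type} [BEq κ] [LawfulBEq κ] (v : κ) (F F' : κ → β) :
    ∀ (l : List κ) (d : PySem.Dict κ β) (w : β), d.contains v = true →
      (∀ x ∈ l, x ≠ v → F x = F' x) → ∀ u,
      (l.foldl (fun d x => d.insert x (F' x)) (d.insert v w)).insert v u
        = (l.foldl (fun d x => d.insert x (F x)) d).insert v u := by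
  intro l
  induction l with
  | nil =>
    intro d w _ _ u
    simp only [List.foldl_nil]
    rw [PySem.Dict.insert_insert_self]
  | cons x xs ih =>
    intro d w hc hagree u
    simp only [List.foldl_cons]
    by_cases hxv : x = v
    · subst hxv
      rw [PySem.Dict.insert_insert_self]
      have h1 : (d.insert x (F x)).insert x (F' x) = d.insert x (F' x) :=
        PySem.Dict.insert_insert_self d x (F x) (F' x)
      rw [← h1]
      exact ih (d.insert x (F x)) (F' x)
        (by rw [PySem.Dict.contains_insert]; simp)
        (fun y hy hyv => hagree y (List.mem_cons_of_mem _ hy) hyv) u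
    · rw [← hagree x (List.mem_cons_self) hxv]
      rw [insert_insert_comm_of_contains d w (F x) hxv hc]
      exact ih (d.insert x (F x)) w
        (by rw [PySem.Dict.contains_insert]; simp [hc])
        (fun y hy hyv => hagree y (List.mem_cons_of_mem _ hy) hyv) u

theorem foldl_insert_congr_at {κ β : Type} [BEq κ] [LawfulBEq κ] (v : κ) (F F' : κ → β) :
    ∀ (l : List κ) (d : PySem.Dict κ β), v ∈ l →
      (∀ x ∈ l, x ≠ v → F x = F' x) → ∀ u,
      (l.foldl (fun d x => d.insert x (F x)) d).insert v u
        = (l.foldl (fun d x => d.insert x (F' x)) d).insert v u := by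
  intro l
  induction l with
  | nil => intro d hv; simp at hv
  | cons x xs ih =>
    intro d hv hagree u
    simp only [List.foldl_cons]
    by_cases hxv : x = v
    · subst hxv
      have h1 : (d.insert x (F x)).insert x (F' x) = d.insert x (F' x) :=
        PySem.Dict.insert_insert_self d x (F x) (F' x)
      rw [← h1]
      exact (foldl_insert_rel x F F' xs (d.insert x (F x)) (F' x)
        (by rw [PySem.Dict.contains_insert]; simp)
        (fun y hy hyv => hagree y (List.mem_cons_of_mem _ hy) hyv) u).symm
    · have hvxs : v ∈ xs := by
        rcases List.mem_cons.mp hv with h | h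
        · exact absurd h.symm hxv
        · exact h
      rw [hagree x (List.mem_cons_self) hxv]
      exact ih (d.insert x (F' x)) hvxs
        (fun y hy hyv => hagree y (List.mem_cons_of_mem _ hy) hyv) u

theorem insert_get?_self {κ β : Type} [BEq κ] [LawfulBEq κ]
    (d : PySem.Dict κ β) {k : κ} {w : β} (hN : d.keys.Nodup) (h : d.get? k = some w) :
    d.insert k w = d := by
  apply PySem.Dict.ext
  have hc : d.contains k = true := by rw [PySem.Dict.contains_eq_isSome_get?, h]; rfl
  rw [PySem.Dict.items_insert_of_contains _ _ hc]
  have hmem : (k, w) ∈ d.items := (PySem.Dict.get?_eq_some_iff_mem_items d k w hN).mp h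
  have hNk : (d.items.map (·.1)).Nodup := by
    simpa [PySem.Dict.keys] using hN
  conv_rhs => rw [← List.map_id d.items]
  apply List.map_congr_left
  intro p hp
  simp only [beq_iff_eq, id]
  by_cases hpk : p.1 = k
  · have : p = (k, w) := List.inj_on_of_nodup_map hNk hp hmem (by simpa using hpk)
    simp [this]
  · simp [hpk]

theorem items_bldD (fvs : List (Int × List Int)) (tvs : List Int) (g : Int → Int → Int → Int)
    (hN : (fvs.map (·.1)).Nodup) :
    (bldD fvs tvs g).items = fvs.map (fun fi => (fi.1, midD fi.2 tvs (g fi.1))) := by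
  unfold bldD
  rw [PySem.Dict.items_foldl_insert_fresh fvs (·.1) (fun fi => midD fi.2 tvs (g fi.1))
        PySem.Dict.empty (fun a _ => by simp) hN]
  rfl

theorem bumpN_bldD (fvs : List (Int × List Int)) (tvs : List Int) (c v t n : Int)
    (hN : (fvs.map (·.1)).Nodup) (hd : Decl fvs tvs (c, v, t)) (g : Int → Int → Int → Int) :
    bumpN c v t n (bldD fvs tvs g)
      = bldD fvs tvs (fun f' v' t' => g f' v' t' + if (f', v', t') = (c, v, t) then n else 0) := by
  obtain ⟨q, hq, hq1, hv, ht⟩ := hd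
  set g' : Int → Int → Int → Int :=
    fun f' v' t' => g f' v' t' + if (f', v', t') = (c, v, t) then n else 0 with hg'
  have hitems := items_bldD fvs tvs g hN
  have hkN : (bldD fvs tvs g).keys.Nodup := by
    simp only [PySem.Dict.keys, hitems, List.map_map]
    simpa [Function.comp] using hN
  have hgetc : (bldD fvs tvs g).getD c PySem.Dict.empty = midD q.2 tvs (g c) := by
    apply PySem.Dict.getD_of_mem_items _ _ hkN
    rw [hitems]
    exact List.mem_map.mpr ⟨q, hq, by rw [hq1]⟩
  have hdv : (midD q.2 tvs (g c)).getD v PySem.Dict.empty = lowD tvs (g c v) := by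
    unfold midD
    rw [PySem.Dict.getD_eq_get?_getD,
        get?_foldl_insertF_of_mem (fun v' => lowD tvs (g c v')) q.2 _ v hv]
    rfl
  have hdt : (lowD tvs (g c v)).getD t 0 = g c v t := by
    unfold lowD
    rw [PySem.Dict.getD_eq_get?_getD,
        get?_foldl_insertF_of_mem (fun t' => g c v t') tvs _ t ht]
    rfl
  have hlow : (lowD tvs (g c v)).insert t (g c v t + n) = lowD tvs (g' c v) := by
    have h1 : g c v t + n = g' c v t := by simp [hg']
    rw [h1]
    unfold lowD
    rw [foldl_insert_congr_at t (fun t' => g c v t') (fun t' => g' c v t') tvs _ ht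
          (fun x _ hxt => by simp [hg', hxt]) (g' c v t)]
    apply insert_get?_self
    · exact PySem.Dict.nodup_keys_foldl_insert tvs (fun _ x => g' c v x) _ (by simp)
    · exact get?_foldl_insertF_of_mem (fun t' => g' c v t') tvs _ t ht
  have hc' : q.1 = c := hq1
  have hmid : (midD q.2 tvs (g c)).insert v (lowD tvs (g' c v)) = midD q.2 tvs (g' c) := by
    unfold midD
    rw [foldl_insert_congr_at v (fun v' => lowD tvs (g c v')) (fun v' => lowD tvs (g' c v'))
          q.2 _ hv (fun x _ hxv => by
            show lowD tvs (g c x) = lowD tvs (g' c x)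
            congr 1
            funext t'
            simp [hg', hxv]) (lowD tvs (g' c v))]
    apply insert_get?_self
    · exact PySem.Dict.nodup_keys_foldl_insert q.2 (fun _ x => lowD tvs (g' c x)) _ (by simp)
    · exact get?_foldl_insertF_of_mem (fun v' => lowD tvs (g' c v')) q.2 _ v hv
  show (bldD fvs tvs g).insert c
      (((bldD fvs tvs g).getD c PySem.Dict.empty).insert v
        ((((bldD fvs tvs g).getD c PySem.Dict.empty).getD v PySem.Dict.empty).insert t
          ((((bldD fvs tvs g).getD c PySem.Dict.empty).getD v PySem.Dict.empty).getD t 0 + n)))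
      = bldD fvs tvs g'
  rw [hgetc, hdv, hdt, hlow, hmid]
  apply PySem.Dict.ext
  have hcont : (bldD fvs tvs g).contains c = true := by
    rw [PySem.Dict.contains_iff_mem_keys]
    simp only [PySem.Dict.keys, hitems, List.map_map]
    exact List.mem_map.mpr ⟨q, hq, hc'⟩
  rw [PySem.Dict.items_insert_of_contains _ _ hcont, hitems, items_bldD fvs tvs g' hN, List.map_map]
  apply List.map_congr_left
  intro fi hfi
  simp only [Function.comp_apply, beq_iff_eq]
  by_cases hfc : fi.1 = c
  · have hfq : fi = q := List.inj_on_of_nodup_map hN hfi hq (by rw [hfc, hc'])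
    subst hfq
    rw [if_pos hfc, hc']
  · rw [if_neg hfc]
    have : g fi.1 = g' fi.1 := by
      funext v' t'
      simp [hg', hfc]
    rw [this]

theorem bump_bldD (fvs : List (Int × List Int)) (tvs : List Int) (c v t : Int)
    (hN : (fvs.map (·.1)).Nodup) (hd : Decl fvs tvs (c, v, t)) (g : Int → Int → Int → Int) :
    bump c v t (bldD fvs tvs g)
      = bldD fvs tvs (fun f' v' t' => g f' v' t' + if (f', v', t') = (c, v, t) then 1 else 0) :=
  bumpN_bldD fvs tvs c v t 1 hN hd g

theorem evfold (fvs : List (Int × List Int)) (tvs : List Int) (hN : (fvs.map (·.1)).Nodup) :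
    ∀ (E : List (Int × Int × Int)), (∀ e ∈ E, Decl fvs tvs e) → ∀ g,
      E.foldl (fun ft e => bump e.1 e.2.1 e.2.2 ft) (bldD fvs tvs g)
        = bldD fvs tvs (fun f v t => g f v t + (E.count (f, v, t) : Int)) := by
  intro E
  induction E with
  | nil =>
    intro _ g
    simp only [List.foldl_nil]
    exact bldD_congr _ _ _ _ (fun f v t => by simp)
  | cons e E ih =>
    intro hdecl g
    obtain ⟨c, vv, tt⟩ := e
    simp only [List.foldl_cons]
    rw [bump_bldD fvs tvs c vv tt hN (hdecl _ List.mem_cons_self) g,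
        ih (fun x hx => hdecl x (List.mem_cons_of_mem _ hx)) _]
    apply bldD_congr
    intro f v t
    rw [List.count_cons]
    by_cases h : (f, v, t) = (c, vv, tt)
    · simp [h]
      ring
    · have h' : ¬ ((c, vv, tt) = (f, v, t)) := fun hh => h hh.symm
      simp [h, h']

theorem rowfold (feats : List Int) (tgt : Int) (ft : PySem.Dict Int (PySem.Dict Int (PySem.Dict Int Int))) :
    (PySem.List.pyRange 0 (feats.length : Int)).foldl (fun ft col =>
        let dv := ft.getD col PySem.Dict.empty
        let dt := dv.getD (PySem.List.pyGetD feats col 0) PySem.Dict.empty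
        ft.insert col (dv.insert (PySem.List.pyGetD feats col 0)
          (dt.insert tgt (dt.getD tgt 0 + 1)))) ft
      = ((PySem.List.enumerate feats).map (fun p => (p.1, p.2, tgt))).foldl
          (fun ft e => bump e.1 e.2.1 e.2.2 ft) ft := by
  rw [List.foldl_map, PySem.List.enumerate_eq_map_pyRange feats 0, List.foldl_map]
  rfl

theorem A_as_evs (dataset : List (List Int × Int)) (featureValues : List (Int × List Int)) (targetValues : List Int) :
    frequencyTables_py dataset featureValues targetValues
      = ((evs dataset).foldl (fun ft e => bump e.1 e.2.1 e.2.2 ft)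
          (bldD featureValues targetValues (fun _ _ _ => 0))).items.map
            (fun p => (p.1, p.2.items.map (fun q => (q.1, q.2.items)))) := by
  show ((PySem.List.pyRange 0 (dataset.length : Int)).foldl (fun ft row =>
      (fun (r : List Int × Int) =>
        (PySem.List.pyRange 0 (r.1.length : Int)).foldl (fun ft col =>
          let dv := ft.getD col PySem.Dict.empty
          let dt := dv.getD (PySem.List.pyGetD r.1 col 0) PySem.Dict.empty
          ft.insert col (dv.insert (PySem.List.pyGetD r.1 col 0)
            (dt.insert r.2 (dt.getD r.2 0 + 1)))) ft)
        (PySem.List.pyGetD dataset row ([], 0))) (bldD featureValues targetValues (fun _ _ _ => 0))).items.map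
          (fun p => (p.1, p.2.items.map (fun q => (q.1, q.2.items)))) = _
  rw [PySem.List.foldl_pyRange_zero_pyGetD' dataset ([], 0)
        (fun ft r => (PySem.List.pyRange 0 (r.1.length : Int)).foldl (fun ft col =>
          let dv := ft.getD col PySem.Dict.empty
          let dt := dv.getD (PySem.List.pyGetD r.1 col 0) PySem.Dict.empty
          ft.insert col (dv.insert (PySem.List.pyGetD r.1 col 0)
            (dt.insert r.2 (dt.getD r.2 0 + 1)))) ft)
        (bldD featureValues targetValues (fun _ _ _ => 0))]
  have hrows : (fun (ft : PySem.Dict Int (PySem.Dict Int (PySem.Dict Int Int))) (r : List Int × Int) =>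
      (PySem.List.pyRange 0 (r.1.length : Int)).foldl (fun ft col =>
        let dv := ft.getD col PySem.Dict.empty
        let dt := dv.getD (PySem.List.pyGetD r.1 col 0) PySem.Dict.empty
        ft.insert col (dv.insert (PySem.List.pyGetD r.1 col 0)
          (dt.insert r.2 (dt.getD r.2 0 + 1)))) ft)
      = (fun ft r => ((PySem.List.enumerate r.1).map (fun p => (p.1, p.2, r.2))).foldl
          (fun ft e => bump e.1 e.2.1 e.2.2 ft) ft) := by
    funext ft r
    exact rowfold r.1 r.2 ft
  rw [hrows]
  unfold evs
  rw [List.foldl_flatMap]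

-- the count of k among the leading run of e's
theorem count_takeWhile (e k : Int × Int × Int) (l : List (Int × Int × Int)) :
    ((l.takeWhile (fun x => x == e)).count k : Int)
      = if k = e then ((l.takeWhile (fun x => x == e)).length : Int) else 0 := by
  by_cases h : k = e
  · subst h
    rw [if_pos rfl]
    congr 1
    exact List.count_eq_length.mpr (fun b hb => ((beq_iff_eq).mp (List.mem_takeWhile_imp (p := fun x => x == k) hb)).symm)
  · rw [if_neg h]
    have : k ∉ l.takeWhile (fun x => x == e) := fun hk =>
      h ((beq_iff_eq).mp (List.mem_takeWhile_imp (p := fun x => x == e) hk))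
    simp [List.count_eq_zero.mpr this]

-- B's run-merge loop, characterised on the symbolic table: one '+= runlength' per run
-- adds exactly each event's multiplicity
theorem mergeRuns_bldD (fvs : List (Int × List Int)) (tvs : List Int) (hN : (fvs.map (·.1)).Nodup) :
    ∀ (N : Nat) (l : List (Int × Int × Int)), l.length ≤ N → (∀ x ∈ l, Decl fvs tvs x) → ∀ g,
      mergeRuns l (bldD fvs tvs g) = bldD fvs tvs (fun f v t => g f v t + (l.count (f, v, t) : Int)) := by
  intro N
  induction N with
  | zero =>
    intro l hl _ g
    have : l = [] := List.eq_nil_of_length_eq_zero (Nat.le_zero.mp hl)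
    subst this
    rw [mergeRuns]
    exact bldD_congr _ _ _ _ (fun f v t => by simp)
  | succ N ih =>
    intro l hl hdecl g
    cases l with
    | nil =>
      rw [mergeRuns]
      exact bldD_congr _ _ _ _ (fun f v t => by simp)
    | cons e rest =>
      obtain ⟨c, v, t⟩ := e
      have hstep : mergeRuns ((c, v, t) :: rest) (bldD fvs tvs g)
          = mergeRuns (rest.dropWhile (fun x => x == (c, v, t)))
              (bumpN c v t (1 + ((rest.takeWhile (fun x => x == (c, v, t))).length : Int))
                (bldD fvs tvs g)) := by
        rw [mergeRuns]
        rfl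
      rw [hstep, bumpN_bldD fvs tvs c v t _ hN (hdecl _ List.mem_cons_self) g]
      have hsub : (rest.dropWhile (fun x => x == (c, v, t))).Sublist rest :=
        List.dropWhile_sublist _
      have hlen : (rest.dropWhile (fun x => x == (c, v, t))).length ≤ N := by
        have := hsub.length_le
        simp only [List.length_cons] at hl
        omega
      rw [ih _ hlen (fun x hx => hdecl x (List.mem_cons_of_mem _ (hsub.mem hx))) _]
      apply bldD_congr
      intro f v' t'
      have hrest : rest = rest.takeWhile (fun x => x == (c, v, t))
          ++ rest.dropWhile (fun x => x == (c, v, t)) :=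
        (List.takeWhile_append_dropWhile).symm
      have hc : ((((c, v, t) :: rest).count (f, v', t')) : Int)
          = (((rest.dropWhile (fun x => x == (c, v, t))).count (f, v', t')) : Int)
            + (if (f, v', t') = (c, v, t)
                then 1 + ((rest.takeWhile (fun x => x == (c, v, t))).length : Int) else 0) := by
        rw [List.count_cons]
        conv_lhs => rw [hrest]
        rw [List.count_append]
        push_cast
        rw [count_takeWhile (c, v, t) (f, v', t') rest]
        by_cases h : (f, v', t') = (c, v, t)
        · simp [h]
          ring
        · have h' : ¬ ((c, v, t) = (f, v', t')) := fun hh => h hh.symm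
          simp [h, h']
      rw [hc]
      ring

-- B unfolded: the comprehension init is the symbolic zero table, the loop is mergeRuns
theorem B_as_mergeRuns (dataset : List (List Int × Int)) (featureValues : List (Int × List Int)) (targetValues : List Int) :
    frequencyTables_py_alt dataset featureValues targetValues
      = (mergeRuns (PySem.List.sorted2 (evs dataset) (fun e => e.1) (fun e => e.2.1))
          (bldD featureValues targetValues (fun _ _ _ => 0))).items.map
          (fun p => (p.1, p.2.items.map (fun q => (q.1, q.2.items)))) := rfl

-- ===== VERDICT (by name: the statement is the Claim_ definition above) =====
theorem frequencyTables_py_spec : Claim_equal_frequencyTables_py := by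
  intro dataset featureValues targetValues _ hpre
  obtain ⟨hN, hdecl⟩ := hpre
  unfold Spec_frequencyTables_py
  have hd : ∀ e ∈ evs dataset, Decl featureValues targetValues e := by
    intro e he
    simp only [evs, List.mem_flatMap, List.mem_map] at he
    obtain ⟨r, hr, p, hp, rfl⟩ := he
    obtain ⟨q, hq, h1, h2, h3⟩ := hdecl r hr p hp
    exact ⟨q, hq, h1, h2, h3⟩
  have hperm : (PySem.List.sorted2 (evs dataset) (fun e => e.1) (fun e => e.2.1)).Perm (evs dataset) :=
    PySem.List.sorted2_perm _ _ _ _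
  rw [A_as_evs, B_as_mergeRuns,
      evfold featureValues targetValues hN (evs dataset) hd (fun _ _ _ => 0),
      mergeRuns_bldD featureValues targetValues hN
        (PySem.List.sorted2 (evs dataset) (fun e => e.1) (fun e => e.2.1)).length _ le_rfl
        (fun x hx => hd x (hperm.mem_iff.mp hx)) (fun _ _ _ => 0)]
  congr 1
  apply congrArg
  exact bldD_congr _ _ _ _ (fun f v t => by rw [hperm.count_eq])
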